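-- pv_equiv track=rewrite | github.com/StivenPabloJimenezCastillo/Ape_3_automatas | deterministas/problema_3.py | validar_numero
-- ===== SOURCE A (Python) =====
-- def validar_numero(cadena):
--     estado = 'q0'
--
--     signos = {'+', '-'}
--     digitos = set('0123456789')
--     punto = '.'
--     exponente = {'e', 'E'}
--
--     for simbolo in cadena:
--         if estado == 'q0':
--             if simbolo in signos:
--                 estado = 'q1'
--             elif simbolo in digitos:
--                 estado = 'q2'
--             elif simbolo == punto:
--                 estado = 'q3'
--             elif simbolo in exponente:
--                 estado = 'q_er'
--             else:
--                 return 'Cadena no válida'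
--         elif estado == 'q1':
--             if simbolo in digitos:
--                 estado = 'q2'
--             else:
--                 return 'Cadena no válida'
--         elif estado == 'q2':
--             if simbolo == punto:
--                 estado = 'q3'
--             elif simbolo in exponente:
--                 estado = 'q4'
--             else:
--                 return 'Cadena no válida'
--         elif estado == 'q3':
--             if simbolo in digitos:
--                 estado = 'q3'
--             elif simbolo in exponente:
--                 estado = 'q4'
--             else:
--                 return 'Cadena no válida'
--         elif estado == 'q4':
--             if simbolo in digitos:
--                 estado = 'q5'
--             elif simbolo in signos:
--                 estado = 'q6'
--             elif simbolo in punto: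
--                 estado = 'q_er'
--             else:
--                 return 'Cadena no válida'
--         elif estado == 'q5':
--             if simbolo in digitos:
--                 estado = 'q5'
--             else:
--                 return 'Cadena no válida'
--         elif estado == 'q6':
--             if simbolo in digitos:
--                 estado = 'q5'
--             elif simbolo in signos:
--                 estado = 'q_er'
--             else:
--                 return 'Cadena no válida'
--
--     if estado == 'q5':
--         return 'Número válido en notación científica'
--     elif estado == 'q_er':
--         return 'Número no válido (error en la cadena)'
--     else:
--         return 'Cadena incompleta o no válida'
-- ===== SOURCE B (Python) =====
-- # Recursive-descent parser over the grammar of the accepted notation: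
-- # mantissa (sign? digit | sign? digit '.' digits* | '.' digits*) then 'e'/'E'
-- # then exponent (sign? digit digits*); each grammar phase is its own function.
--
-- _DIG = '0123456789'
-- _INVALID = 'Cadena no válida'
-- _ERROR = 'Número no válido (error en la cadena)'
-- _INCOMPLETE = 'Cadena incompleta o no válida'
-- _VALID = 'Número válido en notación científica'
--
--
-- def _exp_digits(rest):
--     # after the first exponent digit: only digits may remain
--     for c in rest:
--         if c not in _DIG:
--             return _INVALID
--     return _VALID
--
--
-- def _exponent(rest):
--     # right after 'e'/'E': optional sign, then at least one digit
--     if not rest: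
--         return _INCOMPLETE
--     c, rest = rest[0], rest[1:]
--     if c in _DIG:
--         return _exp_digits(rest)
--     if c in '+-':
--         if not rest:
--             return _INCOMPLETE
--         d, rest2 = rest[0], rest[1:]
--         if d in _DIG:
--             return _exp_digits(rest2)
--         if d in '+-':
--             return _ERROR
--         return _INVALID
--     if c == '.':
--         return _ERROR
--     return _INVALID
--
--
-- def _fraction(rest):
--     # after the decimal point: digits*, then the mandatory exponent marker
--     while rest and rest[0] in _DIG:
--         rest = rest[1:]
--     if not rest:
--         return _INCOMPLETE
--     if rest[0] in 'eE':
--         return _exponent(rest[1:])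
--     return _INVALID
--
--
-- def _after_first_digit(rest):
--     # after the single integer digit: '.' fraction or direct exponent marker
--     if not rest:
--         return _INCOMPLETE
--     c, rest = rest[0], rest[1:]
--     if c == '.':
--         return _fraction(rest)
--     if c in 'eE':
--         return _exponent(rest)
--     return _INVALID
--
--
-- def validar_numero(cadena):
--     rest = list(cadena)
--     if not rest:
--         return _INCOMPLETE
--     c, rest = rest[0], rest[1:]
--     if c in '+-':
--         if not rest:
--             return _INCOMPLETE
--         if rest[0] in _DIG:
--             return _after_first_digit(rest[1:])
--         return _INVALID
--     if c in _DIG: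
--         return _after_first_digit(rest)
--     if c == '.':
--         return _fraction(rest)
--     if c in 'eE':
--         return _ERROR
--     return _INVALID
-- ===== Notes on version B (the rewrite author's own statement) =====
-- stated objective: alternative
-- what changed: Replaced A's single-pass DFA with a seven-way per-state branch cascade by a recursive-descent parser: one small function per grammar phase (mantissa, fraction, exponent sign, exponent digits) that consumes its part of the string and hands the rest to the next phase, with the error state collapsed into immediate returns.
import Mathlib
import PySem

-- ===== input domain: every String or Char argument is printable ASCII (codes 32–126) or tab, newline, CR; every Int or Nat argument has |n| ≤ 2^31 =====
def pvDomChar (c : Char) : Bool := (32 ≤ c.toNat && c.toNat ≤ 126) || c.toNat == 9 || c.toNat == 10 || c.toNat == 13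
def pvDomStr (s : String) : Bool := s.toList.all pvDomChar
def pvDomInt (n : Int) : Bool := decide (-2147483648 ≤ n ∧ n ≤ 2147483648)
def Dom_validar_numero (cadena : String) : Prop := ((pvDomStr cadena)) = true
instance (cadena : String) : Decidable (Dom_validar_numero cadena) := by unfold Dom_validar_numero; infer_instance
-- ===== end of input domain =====

-- B replaces A's single-pass DFA branch cascade by a recursive-descent parser with one
-- function per grammar phase (objective: alternative; same O(n) cost).

-- ===== PORT A =====
def pvSignos : PySem.Set Char := PySem.Set.ofList ['+', '-']
def pvDigitos : PySem.Set Char := PySem.Set.ofList "0123456789".toList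
def pvExponente : PySem.Set Char := PySem.Set.ofList ['e', 'E']

-- `simbolo in punto` with punto = '.' (a 1-char string): membership of a char in a 1-char string is equality, exact
def validar_numero_go (l : List Char) (estado : String) : String :=
  match l with
  | [] =>
    if estado == "q5" then "Número válido en notación científica"
    else if estado == "q_er" then "Número no válido (error en la cadena)"
    else "Cadena incompleta o no válida"
  | simbolo :: rest =>
    if estado == "q0" then
      if pvSignos.contains simbolo then validar_numero_go rest "q1"
      else if pvDigitos.contains simbolo then validar_numero_go rest "q2"
      else if simbolo == '.' then validar_numero_go rest "q3"
      else if pvExponente.contains simbolo then validar_numero_go rest "q_er"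
      else "Cadena no válida"
    else if estado == "q1" then
      if pvDigitos.contains simbolo then validar_numero_go rest "q2"
      else "Cadena no válida"
    else if estado == "q2" then
      if simbolo == '.' then validar_numero_go rest "q3"
      else if pvExponente.contains simbolo then validar_numero_go rest "q4"
      else "Cadena no válida"
    else if estado == "q3" then
      if pvDigitos.contains simbolo then validar_numero_go rest "q3"
      else if pvExponente.contains simbolo then validar_numero_go rest "q4"
      else "Cadena no válida"
    else if estado == "q4" then
      if pvDigitos.contains simbolo then validar_numero_go rest "q5"
      else if pvSignos.contains simbolo then validar_numero_go rest "q6"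
      else if simbolo == '.' then validar_numero_go rest "q_er"
      else "Cadena no válida"
    else if estado == "q5" then
      if pvDigitos.contains simbolo then validar_numero_go rest "q5"
      else "Cadena no válida"
    else if estado == "q6" then
      if pvDigitos.contains simbolo then validar_numero_go rest "q5"
      else if pvSignos.contains simbolo then validar_numero_go rest "q_er"
      else "Cadena no válida"
    else validar_numero_go rest estado   -- no branch matches (estado = "q_er"): the for-loop body does nothing

def validar_numero (cadena : String) : String := validar_numero_go cadena.toList "q0"

-- ===== PORT B =====
def pvDig : List Char := "0123456789".toList
def pvINVALID : String := "Cadena no válida"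
def pvERROR : String := "Número no válido (error en la cadena)"
def pvINCOMPLETE : String := "Cadena incompleta o no válida"
def pvVALID : String := "Número válido en notación científica"

-- after the first exponent digit: only digits may remain
def pvExpDigits (rest : List Char) : String :=
  match rest with
  | [] => pvVALID
  | c :: r => if pvDig.contains c then pvExpDigits r else pvINVALID

-- right after 'e'/'E': optional sign, then at least one digit
def pvExponent (rest : List Char) : String :=
  match rest with
  | [] => pvINCOMPLETE
  | c :: r =>
    if pvDig.contains c then pvExpDigits r
    else if c == '+' || c == '-' then
      match r with
      | [] => pvINCOMPLETE
      | d :: r2 =>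
        if pvDig.contains d then pvExpDigits r2
        else if d == '+' || d == '-' then pvERROR
        else pvINVALID
    else if c == '.' then pvERROR
    else pvINVALID

-- after the decimal point: digits*, then the mandatory exponent marker
def pvFraction (rest : List Char) : String :=
  match rest with
  | [] => pvINCOMPLETE
  | c :: r =>
    if pvDig.contains c then pvFraction r
    else if c == 'e' || c == 'E' then pvExponent r
    else pvINVALID

-- after the single integer digit: '.' fraction or direct exponent marker
def pvAfterFirstDigit (rest : List Char) : String :=
  match rest with
  | [] => pvINCOMPLETE
  | c :: r =>
    if c == '.' then pvFraction r
    else if c == 'e' || c == 'E' then pvExponent r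
    else pvINVALID

def validar_numero_alt (cadena : String) : String :=
  match cadena.toList with
  | [] => pvINCOMPLETE
  | c :: rest =>
    if c == '+' || c == '-' then
      match rest with
      | [] => pvINCOMPLETE
      | d :: r2 => if pvDig.contains d then pvAfterFirstDigit r2 else pvINVALID
    else if pvDig.contains c then pvAfterFirstDigit rest
    else if c == '.' then pvFraction rest
    else if c == 'e' || c == 'E' then pvERROR
    else pvINVALID

-- ===== PRECONDITION & SPEC =====
def Spec_validar_numero (cadena : String) (out : String) : Prop := out = validar_numero_alt cadena
instance (cadena : String) (out : String) : Decidable (Spec_validar_numero cadena out) := by unfold Spec_validar_numero; infer_instance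

-- ===== CLAIM (what is proved, stated in full; the proofs are below) =====
def Claim_equal_validar_numero : Prop := ∀ (cadena : String), Dom_validar_numero cadena → Spec_validar_numero cadena (validar_numero cadena)

-- ===== LEMMAS AND PROOFS =====

-- A's membership tests expressed through B's tests
theorem pvSignos_eq (c : Char) : (c ∈ pvSignos) ↔ (c = '+' ∨ c = '-') := by
  rw [show pvSignos = ['+', '-'] from by decide]; simp

theorem pvDigitos_eq (c : Char) : (c ∈ pvDigitos) ↔ c ∈ pvDig := by
  rw [show pvDigitos = pvDig from by decide]

theorem pvExponente_eq (c : Char) : (c ∈ pvExponente) ↔ (c = 'e' ∨ c = 'E') := by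
  rw [show pvExponente = ['e', 'E'] from by decide]; simp

theorem go_q_er (l : List Char) : validar_numero_go l "q_er" = pvERROR := by
  induction l with
  | nil => rfl
  | cons c r ih => simpa [validar_numero_go] using ih

theorem go_q5 (l : List Char) : validar_numero_go l "q5" = pvExpDigits l := by
  induction l with
  | nil => rfl
  | cons c r ih =>
    simp [validar_numero_go, pvExpDigits, pvDigitos_eq, ih, pvINVALID]

theorem go_q6 (l : List Char) :
    validar_numero_go l "q6" =
      (match l with
       | [] => pvINCOMPLETE
       | d :: r2 =>
         if pvDig.contains d then pvExpDigits r2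
         else if d == '+' || d == '-' then pvERROR
         else pvINVALID) := by
  cases l with
  | nil => rfl
  | cons d r2 =>
    simp [validar_numero_go, pvDigitos_eq, pvSignos_eq, go_q5, go_q_er, pvERROR, pvINVALID]

theorem go_q4 (l : List Char) : validar_numero_go l "q4" = pvExponent l := by
  cases l with
  | nil => rfl
  | cons c r =>
    simp [validar_numero_go, pvExponent, pvDigitos_eq, pvSignos_eq, go_q5, go_q6, go_q_er,
      pvERROR, pvINVALID]

theorem go_q3 (l : List Char) : validar_numero_go l "q3" = pvFraction l := by
  induction l with
  | nil => rfl
  | cons c r ih =>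
    simp [validar_numero_go, pvFraction, pvDigitos_eq, pvExponente_eq, ih, go_q4, pvINVALID]

theorem go_q2 (l : List Char) : validar_numero_go l "q2" = pvAfterFirstDigit l := by
  cases l with
  | nil => rfl
  | cons c r =>
    simp [validar_numero_go, pvAfterFirstDigit, pvExponente_eq, go_q3, go_q4, pvINVALID]

theorem go_q1 (l : List Char) :
    validar_numero_go l "q1" =
      (match l with
       | [] => pvINCOMPLETE
       | d :: r2 => if pvDig.contains d then pvAfterFirstDigit r2 else pvINVALID) := by
  cases l with
  | nil => rfl
  | cons d r2 =>
    simp [validar_numero_go, pvDigitos_eq, go_q2, pvINVALID]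

-- ===== VERDICT (by name: the statement is the Claim_ definition above) =====
theorem validar_numero_spec : Claim_equal_validar_numero := by
  intro cadena _
  unfold Spec_validar_numero validar_numero validar_numero_alt
  cases h : cadena.toList with
  | nil => rfl
  | cons c rest =>
    simp [validar_numero_go, pvSignos_eq, pvDigitos_eq, pvExponente_eq, go_q1, go_q2, go_q3,
      go_q_er, pvERROR, pvINVALID]
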